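-- pv_equiv track=rewrite | github.com/3bsalam/-Gender-and-Facial-Expression-Recognition | HOF.py | get_indicies
-- ===== SOURCE A (Python) =====
-- def get_indicies(number):
--     min = 0
--     max = 0
--
--     if number > 160:
--         min = 160
--         max = 180
--         return min, max
--
--     # check max
--     for i in range(0, 160, 20):
--         if number > i:
--             min = i
--             max = i + 20
--
--     return min, max
-- ===== SOURCE B (Python) =====
-- def get_indicies(number):
--     if number > 160:
--         return 160, 180
--     if number <= 0:
--         return 0, 0
--     lo = (number - 1) // 20 * 20
--     return lo, lo + 20
-- ===== Notes on version B (the rewrite author's own statement) =====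
-- stated objective: simpler
-- what changed: Replaced the fixed eight-step scan over the bucket boundaries with a closed-form floor-division bucket formula plus two boundary guards.
import Mathlib
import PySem

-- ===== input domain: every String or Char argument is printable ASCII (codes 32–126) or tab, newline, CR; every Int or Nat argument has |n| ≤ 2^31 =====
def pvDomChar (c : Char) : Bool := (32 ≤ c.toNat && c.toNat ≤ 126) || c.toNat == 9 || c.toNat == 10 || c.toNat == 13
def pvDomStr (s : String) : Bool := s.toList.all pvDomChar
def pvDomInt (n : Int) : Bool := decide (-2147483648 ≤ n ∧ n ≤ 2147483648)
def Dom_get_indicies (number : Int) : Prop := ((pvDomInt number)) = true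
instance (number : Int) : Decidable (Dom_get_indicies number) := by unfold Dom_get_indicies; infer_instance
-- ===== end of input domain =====

-- B replaces the fixed 8-iteration scan with a closed-form bucket formula; objective: simpler.


-- ===== PORT A =====
def get_indicies (number : Int) : Int × Int :=
  let min : Int := 0
  let max : Int := 0
  if number > 160 then
    (160, 180)
  else
    -- for i in range(0, 160, 20): if number > i: min = i; max = i + 20
    (PySem.List.pyRange 0 160 20).foldl
      (fun (st : Int × Int) i => if number > i then (i, i + 20) else st)
      (min, max)

-- ===== PORT B =====
def get_indicies_alt (number : Int) : Int × Int :=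
  if number > 160 then (160, 180)
  else if number ≤ 0 then (0, 0)
  else
    let lo := PySem.Int.floordiv (number - 1) 20 * 20
    (lo, lo + 20)

-- ===== PRECONDITION & SPEC =====
def Spec_get_indicies (number : Int) (out : Int × Int) : Prop := out = get_indicies_alt number
instance (number : Int) (out : Int × Int) : Decidable (Spec_get_indicies number out) := by unfold Spec_get_indicies; infer_instance

-- ===== CLAIM (what is proved, stated in full; the proofs are below) =====
def Claim_equal_get_indicies : Prop := ∀ (number : Int), Dom_get_indicies number → Spec_get_indicies number (get_indicies number)

-- ===== LEMMAS AND PROOFS =====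
theorem get_indicies_agree (n : Int) : get_indicies n = get_indicies_alt n := by
  unfold get_indicies get_indicies_alt
  have hr : PySem.List.pyRange 0 160 20 = [0, 20, 40, 60, 80, 100, 120, 140] := by decide
  rw [hr]
  by_cases h160 : n > 160
  · simp [h160]
  · simp only [if_neg h160, List.foldl]
    by_cases h0 : n ≤ 0
    · simp only [if_neg h160, if_pos h0]
      split_ifs <;> first | rfl | omega
    · simp only [if_neg h160, if_neg h0]
      have h20 : PySem.Int.floordiv (n - 1) 20 = (n - 1) / 20 :=
        PySem.Int.floordiv_eq_ediv_of_pos (by omega)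
      rw [h20]
      have hq := Int.emod_add_ediv (n - 1) 20
      have hm0 : 0 ≤ (n - 1) % 20 := Int.emod_nonneg _ (by omega)
      have hm1 : (n - 1) % 20 < 20 := Int.emod_lt_of_pos _ (by omega)
      split_ifs <;> (refine Prod.ext ?_ ?_ <;> simp <;> omega)

-- ===== VERDICT (by name: the statement is the Claim_ definition above) =====
theorem get_indicies_spec : Claim_equal_get_indicies := by
  intro n _
  exact get_indicies_agree n
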